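-- pv_equiv track=rewrite | github.com/ijeriomit/AdventofCode | Day_2/src/RepeatLetters.py | countLetterOccurences
-- ===== SOURCE A (Python) =====
-- def countLetterOccurences(let, string):
--     count = 0
--     for i in string:
--         if i == let:
--             count += 1
--             if count > 3:
--                 return count
--     return count
-- ===== SOURCE B (Python) =====
-- def countLetterOccurences(let, string):
--     return min(list(string).count(let), 4)
-- ===== Notes on version B (the rewrite author's own statement) =====
-- stated objective: simpler
-- what changed: Replaces the manual counting loop with early exit after the 4th match by a single full count of matching characters capped with min(.,4).
import Mathlib
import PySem

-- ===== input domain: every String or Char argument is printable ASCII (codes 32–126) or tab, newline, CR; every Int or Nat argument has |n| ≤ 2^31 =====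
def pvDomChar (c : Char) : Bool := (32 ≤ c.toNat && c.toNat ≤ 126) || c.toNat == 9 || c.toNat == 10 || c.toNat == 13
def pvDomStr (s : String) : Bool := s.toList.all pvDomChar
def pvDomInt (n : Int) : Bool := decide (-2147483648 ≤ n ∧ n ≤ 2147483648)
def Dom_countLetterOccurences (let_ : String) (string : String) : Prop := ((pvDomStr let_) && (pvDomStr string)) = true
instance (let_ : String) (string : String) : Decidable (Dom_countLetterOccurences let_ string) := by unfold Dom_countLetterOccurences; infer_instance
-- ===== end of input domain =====

-- B replaces A's early-exit counting loop by one full count capped with min(·,4); objective: simpler.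

-- ===== PORT A =====
-- the for-loop over the string's characters, with the early return when count > 3
def countLetterOccurencesGo (let_ : String) (l : List Char) (count : Int) : Int :=
  match l with
  | [] => count
  | c :: rest =>
    if String.mk [c] = let_ then
      if count + 1 > 3 then count + 1
      else countLetterOccurencesGo let_ rest (count + 1)
    else countLetterOccurencesGo let_ rest count

def countLetterOccurences (let_ : String) (string : String) : Int :=
  countLetterOccurencesGo let_ string.toList 0

-- ===== PORT B =====
def countLetterOccurences_alt (let_ : String) (string : String) : Int :=
  min ((string.toList.countP (fun c => String.mk [c] = let_) : Int)) 4

-- ===== PRECONDITION & SPEC =====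
def Spec_countLetterOccurences (let_ : String) (string : String) (out : Int) : Prop := out = countLetterOccurences_alt let_ string
instance (let_ : String) (string : String) (out : Int) : Decidable (Spec_countLetterOccurences let_ string out) := by unfold Spec_countLetterOccurences; infer_instance

-- ===== CLAIM (what is proved, stated in full; the proofs are below) =====
def Claim_equal_countLetterOccurences : Prop := ∀ (let_ : String) (string : String), Dom_countLetterOccurences let_ string → Spec_countLetterOccurences let_ string (countLetterOccurences let_ string)

-- ===== LEMMAS AND PROOFS =====
lemma countLetterOccurencesGo_eq (let_ : String) (l : List Char) (count : Int)
    (h : count ≤ 3) :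
    countLetterOccurencesGo let_ l count
      = min (count + (l.countP (fun c => String.mk [c] = let_) : Int)) 4 := by
  induction l generalizing count with
  | nil => simp [countLetterOccurencesGo]; omega
  | cons c rest ih =>
    simp only [countLetterOccurencesGo, List.countP_cons]
    by_cases hc : String.mk [c] = let_
    · simp only [hc, if_pos rfl, decide_true]
      by_cases h4 : count + 1 > 3
      · have hcnt : (rest.countP (fun c => String.mk [c] = let_) : Int) ≥ 0 := by positivity
        simp only [if_pos h4]
        push_cast
        omega
      · simp only [if_neg h4]
        rw [ih (count + 1) (by omega)]
        push_cast
        omega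
    · simp only [if_neg hc, decide_eq_true_eq, hc, decide_false]
      rw [ih count h]
      push_cast
      omega

-- ===== VERDICT (by name: the statement is the Claim_ definition above) =====
theorem countLetterOccurences_spec : Claim_equal_countLetterOccurences := by
  intro let_ string _
  unfold Spec_countLetterOccurences countLetterOccurences countLetterOccurences_alt
  rw [countLetterOccurencesGo_eq let_ string.toList 0 (by omega)]
  omega
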